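-- pv_equiv track=rewrite | github.com/zqifdu/py_algorithm_practice | DynamicProgramming/magicStrings.py | magicStrings
-- ===== SOURCE A (Python) =====
-- def magicStrings(n):
--     dp = [[0] * 3 for _ in range(2)]
--     dp[0] = [1, 1, 1]
--
--     for i in range(1, n):
--         # Number of strings ending with a of length i + 1
--         dp[i % 2][0] = dp[(i - 1) % 2][1] + dp[(i - 1) % 2][2]
--         dp[i % 2][1] = dp[(i - 1) % 2][0] + dp[(i - 1) % 2][2]
--         dp[i % 2][2] = dp[(i - 1) % 2][1] + dp[(i - 1) % 2][2]
--
--     return sum(dp[i % 2]) if n > 1 else sum(dp[0])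
-- ===== SOURCE B (Python) =====
-- def magicStrings(n):
--     # Closed form: each dp row becomes all-equal after one step and doubles
--     # every step, so the answer is 3 * 2**(n-1) for n > 1 and 3 otherwise.
--     return 3 if n <= 1 else 3 << (n - 1)
-- ===== Notes on version B (the rewrite author's own statement) =====
-- stated objective: faster
-- what changed: Replaced the O(n) rolling dynamic-programming loop by the closed form 3*2^(n-1), computed with a single bit shift.
import Mathlib
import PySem

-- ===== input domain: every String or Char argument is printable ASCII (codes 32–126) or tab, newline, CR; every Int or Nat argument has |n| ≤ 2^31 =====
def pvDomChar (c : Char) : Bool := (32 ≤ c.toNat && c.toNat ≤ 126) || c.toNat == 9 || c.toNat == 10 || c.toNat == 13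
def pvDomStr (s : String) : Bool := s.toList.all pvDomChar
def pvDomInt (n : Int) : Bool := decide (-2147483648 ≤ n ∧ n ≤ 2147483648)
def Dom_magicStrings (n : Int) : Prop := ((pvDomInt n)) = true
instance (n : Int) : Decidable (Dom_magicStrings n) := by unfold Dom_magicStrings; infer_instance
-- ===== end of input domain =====

-- B replaces A's O(n) rolling-DP loop by the closed form 3·2^(n-1) (one shift): faster.

-- ===== PORT A =====
-- dp is two rows of three ints; one loop iteration writes row (i % 2) from row ((i-1) % 2).
def pvStepA (st : (Int × Int × Int) × (Int × Int × Int)) (i : Int) :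
    (Int × Int × Int) × (Int × Int × Int) :=
  let ((a0, b0, c0), (a1, b1, c1)) := st
  if PySem.Int.mod i 2 == 0 then
    ((b1 + c1, a1 + c1, b1 + c1), (a1, b1, c1))
  else
    ((a0, b0, c0), (b0 + c0, a0 + c0, b0 + c0))

def magicStrings (n : Int) : Int :=
  let dp := (PySem.List.pyRange 1 n 1).foldl pvStepA ((1, 1, 1), (0, 0, 0))
  if n > 1 then
    -- after the loop i = n - 1, so sum(dp[i % 2]) reads row ((n-1) % 2)
    let r := if PySem.Int.mod (n - 1) 2 == 0 then dp.1 else dp.2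
    r.1 + r.2.1 + r.2.2
  else
    dp.1.1 + dp.1.2.1 + dp.1.2.2

-- ===== PORT B =====
def magicStrings_alt (n : Int) : Int :=
  if n ≤ 1 then 3 else 3 * 2 ^ (n - 1).toNat

-- ===== PRECONDITION & SPEC =====
def Spec_magicStrings (n : Int) (out : Int) : Prop := out = magicStrings_alt n
instance (n : Int) (out : Int) : Decidable (Spec_magicStrings n out) := by unfold Spec_magicStrings; infer_instance

-- ===== CLAIM (what is proved, stated in full; the proofs are below) =====
def Claim_equal_magicStrings : Prop := ∀ (n : Int), Dom_magicStrings n → Spec_magicStrings n (magicStrings n)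

-- ===== LEMMAS AND PROOFS =====

-- State of A's loop after processing i = 1 .. m+1: the row written last holds
-- three copies of 2^(m+1), the other row three copies of 2^m.
theorem pvLoopA_inv (m : Nat) :
    (PySem.List.pyRange 1 ((m : Int) + 2) 1).foldl pvStepA ((1, 1, 1), (0, 0, 0)) =
      if (m + 1) % 2 = 0 then
        (((2 ^ (m + 1) : Int), (2 ^ (m + 1) : Int), (2 ^ (m + 1) : Int)),
         ((2 ^ m : Int), (2 ^ m : Int), (2 ^ m : Int)))
      else
        (((2 ^ m : Int), (2 ^ m : Int), (2 ^ m : Int)),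
         ((2 ^ (m + 1) : Int), (2 ^ (m + 1) : Int), (2 ^ (m + 1) : Int))) := by
  induction m with
  | zero =>
      have h : ((0 : Nat) : Int) + 2 = 1 + 1 := by norm_num
      rw [h, PySem.List.pyRange_one_singleton]
      simp [pvStepA, PySem.Int.mod]
  | succ k ih =>
      have hle : (1 : Int) ≤ (k : Int) + 2 := by omega
      have h : ((k + 1 : Nat) : Int) + 2 = ((k : Int) + 2) + 1 := by push_cast; ring
      rw [h, PySem.List.pyRange_one_succ_right hle, List.foldl_append, ih]
      have hmod : PySem.Int.mod ((k : Int) + 2) 2 = ((k + 2) % 2 : Nat) := by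
        have := PySem.Int.mod_natCast (k + 2) 2
        push_cast at this ⊢
        omega
      rcases Nat.even_or_odd k with hk | hk
      · obtain ⟨j, rfl⟩ := hk
        have h1 : (j + j + 1) % 2 = 1 := by omega
        have h2 : (j + j + 1 + 1) % 2 = 0 := by omega
        have h3 : (j + j + 2) % 2 = 0 := by omega
        simp only [h1, h2, if_neg (by omega : ¬ (1 : Nat) = 0)]
        simp only [List.foldl_cons, List.foldl_nil, pvStepA, hmod, h3]
        norm_num [pow_succ]
        ring
      · obtain ⟨j, rfl⟩ := hk
        have h1 : (2 * j + 1 + 1) % 2 = 0 := by omega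
        have h2 : (2 * j + 1 + 1 + 1) % 2 = 1 := by omega
        have h3 : (2 * j + 1 + 2) % 2 = 1 := by omega
        simp only [h1, h2, if_neg (by omega : ¬ (1 : Nat) = 0)]
        simp only [List.foldl_cons, List.foldl_nil, pvStepA, hmod, h3]
        norm_num [pow_succ]
        ring

-- ===== VERDICT (by name: the statement is the Claim_ definition above) =====
theorem magicStrings_spec : Claim_equal_magicStrings := by
  intro n _
  unfold Spec_magicStrings magicStrings magicStrings_alt
  by_cases hn : n > 1
  · -- n = m + 2 for a natural m
    obtain ⟨m, hm⟩ : ∃ m : Nat, n = (m : Int) + 2 := ⟨(n - 2).toNat, by omega⟩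
    subst hm
    rw [if_pos hn, if_neg (by omega : ¬ ((m : Int) + 2 ≤ 1))]
    have e1 : (m : Int) + 2 - 1 = ((m + 1 : Nat) : Int) := by push_cast; ring
    have hmod : PySem.Int.mod ((m : Int) + 2 - 1) 2 = ((m + 1) % 2 : Nat) := by
      rw [e1]
      exact_mod_cast PySem.Int.mod_natCast (m + 1) 2
    have htn : ((m : Int) + 2 - 1).toNat = m + 1 := by omega
    rw [pvLoopA_inv m, htn]
    rcases Nat.even_or_odd (m + 1) with hk | hk
    · have h0 : (m + 1) % 2 = 0 := Nat.even_iff.mp hk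
      simp only [h0, hmod]
      norm_num
      ring
    · have h0 : (m + 1) % 2 = 1 := Nat.odd_iff.mp hk
      simp only [h0, hmod, if_neg (by omega : ¬ (1 : Nat) = 0)]
      norm_num
      ring
  · have hle : n ≤ 1 := by omega
    rw [if_neg hn, if_pos hle]
    have : PySem.List.pyRange 1 n 1 = [] := by
      have := PySem.List.pyRange_one 1 n
      rw [this]
      have : (n - 1).toNat = 0 := by omega
      simp [this]
    rw [this]
    norm_num
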